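-- pv_equiv track=rewrite | github.com/Abhinav-4123/open_claw_automation | qa-agent/app/agents/report_agent.py | _render_compliance
-- ===== SOURCE A (Python) =====
-- from typing import Any, Dict, List, Optional
--
-- def _render_compliance(findings: List[Dict]) -> str:
--     """Render compliance mapping."""
--     # Map findings to compliance frameworks
--     frameworks = {
--         "OWASP Top 10": {"issues": 0, "total": 10},
--         "PCI DSS": {"issues": 0, "total": 12},
--         "GDPR": {"issues": 0, "total": 5},
--         "SOC 2": {"issues": 0, "total": 5},
--         "ISO 27001": {"issues": 0, "total": 10},
--         "HIPAA": {"issues": 0, "total": 5},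
--     }
--
--     # Simple mapping based on check IDs
--     for f in findings:
--         check_id = f.get("check_id", "")
--         if "IF-" in check_id or "IN-" in check_id:
--             frameworks["OWASP Top 10"]["issues"] += 1
--         if "CR-" in check_id or "AU-" in check_id:
--             frameworks["PCI DSS"]["issues"] += 1
--         if "DS-" in check_id:
--             frameworks["GDPR"]["issues"] += 1
--             frameworks["HIPAA"]["issues"] += 1
--
--     html = '<div class="compliance-grid">'
--     for name, data in frameworks.items():
--         issues = data["issues"]
--         status = "Needs Review" if issues > 0 else "Compliant"
--         html += f"""
--         <div class="compliance-card">
--             <h4>{name}</h4>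
--             <div class="status">{'Needs Review' if issues > 0 else '&check;'}</div>
--             <p>{issues} issues found</p>
--         </div>
--         """
--     html += "</div>"
--     return html
-- ===== SOURCE B (Python) =====
-- def _render_compliance(findings):
--     """Render compliance mapping."""
--     table = [
--         ("OWASP Top 10", 10, lambda cid: "IF-" in cid or "IN-" in cid),
--         ("PCI DSS", 12, lambda cid: "CR-" in cid or "AU-" in cid),
--         ("GDPR", 5, lambda cid: "DS-" in cid),
--         ("SOC 2", 5, lambda cid: False),
--         ("ISO 27001", 10, lambda cid: False),
--         ("HIPAA", 5, lambda cid: "DS-" in cid),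
--     ]
--     cards = []
--     for name, total, pred in table:
--         issues = sum(1 for f in findings if pred(f.get("check_id", "")))
--         cards.append(
--             f"""
--         <div class="compliance-card">
--             <h4>{name}</h4>
--             <div class="status">{'Needs Review' if issues > 0 else '&check;'}</div>
--             <p>{issues} issues found</p>
--         </div>
--         """
--         )
--     return '<div class="compliance-grid">' + "".join(cards) + "</div>"
-- ===== Notes on version B (the rewrite author's own statement) =====
-- stated objective: alternative
-- what changed: Replaced A's single accumulating pass over findings with shared per-framework counters in a dict by a data-driven table mapping each framework to a predicate on check_id, counting each framework's issues with one sum per table row and joining the rendered cards.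
import Mathlib
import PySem

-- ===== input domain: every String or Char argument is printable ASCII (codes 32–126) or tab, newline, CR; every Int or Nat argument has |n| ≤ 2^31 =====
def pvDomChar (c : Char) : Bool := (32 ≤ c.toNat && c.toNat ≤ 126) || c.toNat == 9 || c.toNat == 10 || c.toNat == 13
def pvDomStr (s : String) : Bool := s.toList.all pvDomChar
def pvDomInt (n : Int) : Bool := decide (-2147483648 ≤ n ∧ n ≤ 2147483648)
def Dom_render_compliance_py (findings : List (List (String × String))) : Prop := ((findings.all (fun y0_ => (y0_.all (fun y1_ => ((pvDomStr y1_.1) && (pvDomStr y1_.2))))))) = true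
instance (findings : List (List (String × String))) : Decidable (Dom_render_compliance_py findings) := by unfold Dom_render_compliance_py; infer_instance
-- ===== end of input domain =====

-- B replaces A's single accumulating pass with shared counters by a data-driven table
-- (framework, total, predicate on check_id) and one count per framework; objective: alternative decomposition, same output.

-- ===== PORT A =====
-- f.get("check_id", "")
def pvCheckId (f : List (String × String)) : String :=
  (PySem.Dict.mk f).getD "check_id" ""

-- the body of A's counting loop (one finding)
def pvStepA (d : PySem.Dict String (Int × Int)) (f : List (String × String)) :
    PySem.Dict String (Int × Int) :=
  let cid := pvCheckId f
  let d := if PySem.Str.isIn "IF-" cid || PySem.Str.isIn "IN-" cid then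
      d.modify "OWASP Top 10" (0, 0) (fun p => (p.1 + 1, p.2)) else d
  let d := if PySem.Str.isIn "CR-" cid || PySem.Str.isIn "AU-" cid then
      d.modify "PCI DSS" (0, 0) (fun p => (p.1 + 1, p.2)) else d
  if PySem.Str.isIn "DS-" cid then
      (d.modify "GDPR" (0, 0) (fun p => (p.1 + 1, p.2))).modify "HIPAA" (0, 0) (fun p => (p.1 + 1, p.2))
    else d

-- the triple-quoted f-string card (A's dead local 'status' is dropped)
def pvCard (name : String) (issues : Int) : String :=
  PySem.Str.join ""
    ["\n        <div class=\"compliance-card\">\n            <h4>", name,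
     "</h4>\n            <div class=\"status\">",
     (if issues > 0 then "Needs Review" else "&check;"),
     "</div>\n            <p>", PySem.Int.toStr issues,
     " issues found</p>\n        </div>\n        "]

def render_compliance_py (findings : List (List (String × String))) : String :=
  let frameworks : PySem.Dict String (Int × Int) := PySem.Dict.mk
    [("OWASP Top 10", (0, 10)), ("PCI DSS", (0, 12)), ("GDPR", (0, 5)),
     ("SOC 2", (0, 5)), ("ISO 27001", (0, 10)), ("HIPAA", (0, 5))]
  let frameworks := findings.foldl pvStepA frameworks
  let html := frameworks.items.foldl
    (fun html nd => PySem.Str.join "" [html, pvCard nd.1 nd.2.1])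
    "<div class=\"compliance-grid\">"
  PySem.Str.join "" [html, "</div>"]

-- ===== PORT B =====
def pvTableB : List (String × Int × (String → Bool)) :=
  [("OWASP Top 10", 10, fun cid => PySem.Str.isIn "IF-" cid || PySem.Str.isIn "IN-" cid),
   ("PCI DSS", 12, fun cid => PySem.Str.isIn "CR-" cid || PySem.Str.isIn "AU-" cid),
   ("GDPR", 5, fun cid => PySem.Str.isIn "DS-" cid),
   ("SOC 2", 5, fun _ => false),
   ("ISO 27001", 10, fun _ => false),
   ("HIPAA", 5, fun cid => PySem.Str.isIn "DS-" cid)]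

def render_compliance_py_alt (findings : List (List (String × String))) : String :=
  let cards := pvTableB.map (fun e =>
    let issues : Int := (findings.countP (fun f => e.2.2 (pvCheckId f)) : Int)
    pvCard e.1 issues)
  PySem.Str.join "" (["<div class=\"compliance-grid\">"] ++ cards ++ ["</div>"])

-- ===== PRECONDITION & SPEC =====
def Spec_render_compliance_py (findings : List (List (String × String))) (out : String) : Prop := out = render_compliance_py_alt findings
instance (findings : List (List (String × String))) (out : String) : Decidable (Spec_render_compliance_py findings out) := by unfold Spec_render_compliance_py; infer_instance

-- ===== CLAIM (what is proved, stated in full; the proofs are below) =====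
def Claim_equal_render_compliance_py : Prop := ∀ (findings : List (List (String × String))), Dom_render_compliance_py findings → Spec_render_compliance_py findings (render_compliance_py findings)

-- ===== LEMMAS AND PROOFS =====
-- which framework a finding increments, per key (proof-only)
def pvContrib (k : String) (f : List (String × String)) : Bool :=
  let cid := pvCheckId f
  if k = "OWASP Top 10" then PySem.Str.isIn "IF-" cid || PySem.Str.isIn "IN-" cid
  else if k = "PCI DSS" then PySem.Str.isIn "CR-" cid || PySem.Str.isIn "AU-" cid
  else if k = "GDPR" ∨ k = "HIPAA" then PySem.Str.isIn "DS-" cid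
  else false

theorem pvStepA_getD (d : PySem.Dict String (Int × Int)) (f : List (String × String)) (k : String) :
    (pvStepA d f).getD k (0, 0) =
      ((d.getD k (0, 0)).1 + (if pvContrib k f then 1 else 0), (d.getD k (0, 0)).2) := by
  unfold pvStepA pvContrib
  by_cases h1 : k = "OWASP Top 10" <;> by_cases h2 : k = "PCI DSS" <;>
    by_cases h3 : k = "GDPR" <;> by_cases h4 : k = "HIPAA" <;>
    simp_all [PySem.Dict.getD_modify] <;> split_ifs <;> simp_all [PySem.Dict.getD_modify]

theorem pvLoop_getD (l : List (List (String × String))) (d : PySem.Dict String (Int × Int)) (k : String) :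
    (l.foldl pvStepA d).getD k (0, 0) =
      ((d.getD k (0, 0)).1 + (l.countP (pvContrib k) : Int), (d.getD k (0, 0)).2) := by
  induction l generalizing d with
  | nil => simp
  | cons f t ih =>
      simp only [List.foldl_cons, List.countP_cons, ih, pvStepA_getD]
      split_ifs <;> push_cast <;> ring_nf
theorem pvKeysModify {ν : Type} (d : PySem.Dict String ν) (k : String) (d0 : ν) (g : ν → ν)
    (h : k ∈ d.keys) : (d.modify k d0 g).keys = d.keys := by
  rw [PySem.Dict.keys_modify,
    PySem.Dict.keys_insert_of_contains _ _ ((PySem.Dict.contains_iff_mem_keys _ _).mpr h)]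

theorem pvMemModify {ν : Type} {d : PySem.Dict String ν} {k k' : String} {d0 : ν} {g : ν → ν}
    (h : k' ∈ d.keys) : k' ∈ (d.modify k d0 g).keys := by
  rw [PySem.Dict.keys_modify]
  exact (PySem.Dict.mem_keys_insert _ _ _ _).mpr (Or.inr h)

theorem pvStepA_keys (d : PySem.Dict String (Int × Int)) (f : List (String × String))
    (h1 : "OWASP Top 10" ∈ d.keys) (h2 : "PCI DSS" ∈ d.keys)
    (h3 : "GDPR" ∈ d.keys) (h4 : "HIPAA" ∈ d.keys) :
    (pvStepA d f).keys = d.keys := by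
  unfold pvStepA
  dsimp only
  split_ifs <;>
    ((repeat rw [pvKeysModify _ _ _ _ (by repeat (first | assumption | apply pvMemModify))]); try rfl)

theorem pvLoop_keys (l : List (List (String × String))) (d : PySem.Dict String (Int × Int))
    (h1 : "OWASP Top 10" ∈ d.keys) (h2 : "PCI DSS" ∈ d.keys)
    (h3 : "GDPR" ∈ d.keys) (h4 : "HIPAA" ∈ d.keys) :
    (l.foldl pvStepA d).keys = d.keys := by
  induction l generalizing d with
  | nil => rfl
  | cons f t ih =>
      have hk := pvStepA_keys d f h1 h2 h3 h4
      simp only [List.foldl_cons]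
      rw [ih _ (hk ▸ h1) (hk ▸ h2) (hk ▸ h3) (hk ▸ h4), hk]

theorem pvJoinChain (a s1 s2 s3 s4 s5 s6 z : String) :
    PySem.Str.join "" [PySem.Str.join "" [PySem.Str.join "" [PySem.Str.join "" [PySem.Str.join "" [PySem.Str.join "" [PySem.Str.join "" [a, s1], s2], s3], s4], s5], s6], z]
    = PySem.Str.join "" ([a] ++ [s1, s2, s3, s4, s5, s6] ++ [z]) := by
  apply String.toList_inj.mp
  simp [PySem.Str.toList_join, PySem.Chars.join_cons_cons, PySem.Chars.join_singleton,
    List.append_assoc]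

-- ===== VERDICT (by name: the statement is the Claim_ definition above) =====
theorem render_compliance_py_spec : Claim_equal_render_compliance_py := by
  intro findings _
  unfold Spec_render_compliance_py render_compliance_py render_compliance_py_alt
  dsimp only
  have hkeys : (findings.foldl pvStepA (PySem.Dict.mk
      [("OWASP Top 10", ((0 : Int), (10 : Int))), ("PCI DSS", (0, 12)), ("GDPR", (0, 5)),
       ("SOC 2", (0, 5)), ("ISO 27001", (0, 10)), ("HIPAA", (0, 5))])).keys =
      ["OWASP Top 10", "PCI DSS", "GDPR", "SOC 2", "ISO 27001", "HIPAA"] := by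
    rw [pvLoop_keys _ _ (by decide) (by decide) (by decide) (by decide)]; decide
  have hnd : (findings.foldl pvStepA (PySem.Dict.mk
      [("OWASP Top 10", ((0 : Int), (10 : Int))), ("PCI DSS", (0, 12)), ("GDPR", (0, 5)),
       ("SOC 2", (0, 5)), ("ISO 27001", (0, 10)), ("HIPAA", (0, 5))])).keys.Nodup := by
    rw [hkeys]; decide
  have hitems := PySem.Dict.items_eq_map_keys _ hnd ((0 : Int), (0 : Int))
  rw [hkeys] at hitems
  simp only [List.map_cons, List.map_nil, pvLoop_getD] at hitems
  rw [hitems]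
  simp only [List.foldl_cons, List.foldl_nil, pvTableB, List.map_cons, List.map_nil,
    List.cons_append, List.nil_append]
  rw [pvJoinChain]
  have hO : pvContrib "OWASP Top 10" =
      fun f => PySem.Str.isIn "IF-" (pvCheckId f) || PySem.Str.isIn "IN-" (pvCheckId f) := by
    funext f; simp [pvContrib]
  have hP : pvContrib "PCI DSS" =
      fun f => PySem.Str.isIn "CR-" (pvCheckId f) || PySem.Str.isIn "AU-" (pvCheckId f) := by
    funext f; simp [pvContrib]
  have hG : pvContrib "GDPR" = fun f => PySem.Str.isIn "DS-" (pvCheckId f) := by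
    funext f; simp [pvContrib]
  have hH : pvContrib "HIPAA" = fun f => PySem.Str.isIn "DS-" (pvCheckId f) := by
    funext f; simp [pvContrib]
  have hS : pvContrib "SOC 2" = fun _ => false := by funext f; simp [pvContrib]
  have hI : pvContrib "ISO 27001" = fun _ => false := by funext f; simp [pvContrib]
  simp [hO, hP, hG, hH, hS, hI, PySem.Dict.getD_eq_get?_getD, PySem.Dict.get?_mk_cons]
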